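-- pv_equiv track=rewrite | github.com/sonishsivarajkumar/ProtoScribe | src/protoscribe/services/compliance_checker.py | _find_relevant_sections
-- ===== SOURCE A (Python) =====
-- from typing import Dict, List, Any
--
-- def _find_relevant_sections(sections: Dict[str, str], section_hint: str) -> Dict[str, str]:
--     """Find sections relevant to the guideline item"""
--
--     relevant = {}
--
--     # Direct match
--     for section_name, content in sections.items():
--         if section_hint in section_name.lower():
--             relevant[section_name] = content
--
--     # Pattern matching for common section types
--     section_patterns = {
--         'method': ['method', 'design', 'procedure'],
--         'participant': ['participant', 'subject', 'population', 'eligibility'],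
--         'outcome': ['outcome', 'endpoint', 'measure'],
--         'statistical': ['statistical', 'analysis', 'sample'],
--         'abstract': ['abstract', 'summary'],
--         'introduction': ['introduction', 'background'],
--         'ethics': ['ethics', 'ethical', 'consent']
--     }
--
--     for pattern_key, patterns in section_patterns.items():
--         if any(p in section_hint for p in patterns):
--             for section_name, content in sections.items():
--                 if any(p in section_name.lower() for p in patterns):
--                     relevant[section_name] = content
--
--     return relevant if relevant else sections
-- ===== SOURCE B (Python) =====
-- def _find_relevant_sections(sections, section_hint):
--     """Rank each section by the first matching criterion (direct hint match, then each
--     pattern family mentioned in the hint) and return the matches grouped by rank."""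
--
--     section_patterns = {
--         'method': ['method', 'design', 'procedure'],
--         'participant': ['participant', 'subject', 'population', 'eligibility'],
--         'outcome': ['outcome', 'endpoint', 'measure'],
--         'statistical': ['statistical', 'analysis', 'sample'],
--         'abstract': ['abstract', 'summary'],
--         'introduction': ['introduction', 'background'],
--         'ethics': ['ethics', 'ethical', 'consent']
--     }
--     active = [ps for ps in section_patterns.values()
--               if any(p in section_hint for p in ps)]
--
--     def rank(name):
--         low = name.lower()
--         if section_hint in low:
--             return 0
--         for i, ps in enumerate(active):
--             if any(p in low for p in ps):
--                 return i + 1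
--         return None
--
--     matched = [(name, content) for name, content in sections.items()
--                if rank(name) is not None]
--     relevant = dict(sorted(matched, key=lambda item: rank(item[0])))
--     return relevant if relevant else sections
-- ===== Notes on version B (the rewrite author's own statement) =====
-- stated objective: alternative
-- what changed: B computes for each section a single rank (0 = direct hint match, i+1 = first pattern family mentioned in the hint that matches the name) and returns the matching sections stably sorted by that rank in one pass plus a sort; A instead rescans the whole section dict once per matching pattern family and relies on dict overwrite to deduplicate. Pre_ excludes association lists with duplicate keys, which a Python dict argument can never carry.
import Mathlib
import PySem

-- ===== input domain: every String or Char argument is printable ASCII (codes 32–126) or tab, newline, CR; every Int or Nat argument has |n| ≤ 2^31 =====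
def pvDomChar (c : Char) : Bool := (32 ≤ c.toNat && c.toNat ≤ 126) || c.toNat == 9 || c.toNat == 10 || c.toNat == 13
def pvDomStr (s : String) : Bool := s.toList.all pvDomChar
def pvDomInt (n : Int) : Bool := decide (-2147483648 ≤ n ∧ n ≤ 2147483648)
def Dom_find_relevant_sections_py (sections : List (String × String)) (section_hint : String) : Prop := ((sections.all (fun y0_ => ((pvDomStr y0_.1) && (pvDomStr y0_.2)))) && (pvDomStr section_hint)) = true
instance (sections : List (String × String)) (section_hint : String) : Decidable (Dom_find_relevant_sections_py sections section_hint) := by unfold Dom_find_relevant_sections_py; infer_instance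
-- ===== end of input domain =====

-- B ranks every section once by the first criterion that matches it (direct hint match, then
-- each pattern family mentioned in the hint) and emits the matches sorted by that rank in a
-- single pass; A instead rescans the whole section dict once per matching pattern family,
-- relying on dict overwrite to deduplicate (objective: alternative decomposition, same cost).

-- the fixed pattern table both Python versions write as a literal dict
def patternTable : List (String × List String) :=
  [("method", ["method", "design", "procedure"]),
   ("participant", ["participant", "subject", "population", "eligibility"]),
   ("outcome", ["outcome", "endpoint", "measure"]),
   ("statistical", ["statistical", "analysis", "sample"]),
   ("abstract", ["abstract", "summary"]),
   ("introduction", ["introduction", "background"]),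
   ("ethics", ["ethics", "ethical", "consent"])]

-- ===== PORT A =====
def find_relevant_sections_py (sections : List (String × String)) (section_hint : String) : List (String × String) :=
  let relevant1 : PySem.Dict String String :=
    sections.foldl (fun d s =>
      if PySem.Str.isIn section_hint (PySem.Str.lower s.1) then d.insert s.1 s.2 else d)
      PySem.Dict.empty
  let relevant2 : PySem.Dict String String :=
    patternTable.foldl (fun d g =>
      if g.2.any (fun p => PySem.Str.isIn p section_hint) then
        sections.foldl (fun d' s =>
          if g.2.any (fun p => PySem.Str.isIn p (PySem.Str.lower s.1)) then d'.insert s.1 s.2 else d')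
          d
      else d) relevant1
  if relevant2.items.isEmpty then sections else relevant2.items

-- ===== PORT B =====
def find_relevant_sections_py_alt (sections : List (String × String)) (section_hint : String) : List (String × String) :=
  let active : List (List String) :=
    (patternTable.map Prod.snd).filter (fun ps => ps.any (fun p => PySem.Str.isIn p section_hint))
  let rank : String → Option Nat := fun name =>
    let low := PySem.Str.lower name
    if PySem.Str.isIn section_hint low then some 0
    else (active.findIdx? (fun ps => ps.any (fun p => PySem.Str.isIn p low))).map (· + 1)
  let matched := sections.filter (fun s => (rank s.1).isSome)
  -- rank is always `some` on matched, so `.getD 0` extracts exactly Python's int sort key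
  let relevant : PySem.Dict String String :=
    PySem.Dict.ofList (PySem.List.sorted matched (fun item => (rank item.1).getD 0) false)
  if relevant.items.isEmpty then sections else relevant.items

-- ===== PRECONDITION & SPEC =====
-- Pre_ excludes association lists with duplicate keys: a Python dict argument can never
-- carry them, so A's behaviour there is not defined by the source.
def Pre_find_relevant_sections_py (sections : List (String × String)) (section_hint : String) : Prop :=
  (sections.map Prod.fst).Nodup
instance (sections : List (String × String)) (section_hint : String) : Decidable (Pre_find_relevant_sections_py sections section_hint) := by unfold Pre_find_relevant_sections_py; infer_instance

def pvWitness_find_relevant_sections_py : (List (String × String)) × String :=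
  ([("Methods and Design", "m"), ("Abstract", "a")], "method")

def Spec_find_relevant_sections_py (sections : List (String × String)) (section_hint : String) (out : List (String × String)) : Prop := out = find_relevant_sections_py_alt sections section_hint
instance (sections : List (String × String)) (section_hint : String) (out : List (String × String)) : Decidable (Spec_find_relevant_sections_py sections section_hint out) := by unfold Spec_find_relevant_sections_py; infer_instance

-- ===== CLAIM (what is proved, stated in full; the proofs are below) =====
def Claim_equal_find_relevant_sections_py : Prop := ∀ (sections : List (String × String)) (section_hint : String), Dom_find_relevant_sections_py sections section_hint → Pre_find_relevant_sections_py sections section_hint → Spec_find_relevant_sections_py sections section_hint (find_relevant_sections_py sections section_hint)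

-- ===== LEMMAS AND PROOFS =====

-- abbreviations used only by the proofs
def mtch (g : List String) (s : String × String) : Bool :=
  g.any (fun p => PySem.Str.isIn p (PySem.Str.lower s.1))

def direct (hint : String) (s : String × String) : Bool :=
  PySem.Str.isIn hint (PySem.Str.lower s.1)

-- the sections added by the successive pattern-group passes, in A's insertion order:
-- for each group, the sections it matches that no earlier phase (cov) covered
def fibs (l : List (String × String)) (gs : List (List String))
    (cov : (String × String) → Bool) : List (String × String) :=
  match gs with
  | [] => []
  | g :: gs' => l.filter (fun s => mtch g s && !cov s) ++ fibs l gs' (fun s => cov s || mtch g s)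

-- first phase selecting s: some 0 = direct match, some (i+1) = i-th active group, none = no phase
def rk (hint : String) (gs : List (List String)) (s : String × String) : Option Nat :=
  if direct hint s then some 0 else (gs.findIdx? (fun g => mtch g s)).map (· + 1)

-- a fold that skips non-c elements is the fold over the filtered list
theorem foldl_if_filter {α β : Type} (c : α → Bool) (g : β → α → β) :
    ∀ (l : List α) (a : β),
      l.foldl (fun acc x => if c x then g acc x else acc) a = (l.filter c).foldl g a := by
  intro l
  induction l with
  | nil => intro a; rfl
  | cons x l ih =>
    intro a
    by_cases h : c x = true
    · simp [h, ih]
    · simp at h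
      simp [h, ih]

-- keys of a sub-collection of a nodup-keyed list: s.1 occurs iff s itself does
theorem mem_keys_iff {l L : List (String × String)} {s : String × String}
    (hl : (l.map Prod.fst).Nodup) (hL : ∀ t ∈ L, t ∈ l) (hs : s ∈ l) :
    s.1 ∈ L.map Prod.fst ↔ s ∈ L := by
  constructor
  · intro h
    rcases List.mem_map.1 h with ⟨t, htL, hts⟩
    have : t = s := List.inj_on_of_nodup_map hl (hL t htL) hs hts
    simpa [this] using htL
  · intro h; exact List.mem_map.2 ⟨s, h, rfl⟩

-- re-inserting a pair already present leaves the items unchanged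
theorem insert_mem_items (d : PySem.Dict String String) {k v : String}
    (hnd : d.keys.Nodup) (hmem : (k, v) ∈ d.items) : (d.insert k v).items = d.items := by
  have hc : d.contains k = true := by
    simp only [PySem.Dict.contains]
    exact List.any_eq_true.2 ⟨(k, v), hmem, by simp⟩
  rw [PySem.Dict.items_insert_of_contains d v hc]
  conv_rhs => rw [← List.map_id d.items]
  apply List.map_congr_left
  intro p hp
  by_cases hpk : p.1 = k
  · have : p = (k, v) :=
      List.inj_on_of_nodup_map hnd hp hmem (by simpa using hpk)
    simp [this]
  · simp [hpk]

-- one pass of inserts: present keys overwrite in place, fresh keys append in order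
theorem passA :
    ∀ (m : List (String × String)) (d : PySem.Dict String String),
      d.keys.Nodup → (m.map Prod.fst).Nodup →
      (∀ s ∈ m, d.contains s.1 = true → (s.1, s.2) ∈ d.items) →
      (m.foldl (fun d' s => d'.insert s.1 s.2) d).items
        = d.items ++ m.filter (fun s => !d.contains s.1) := by
  intro m
  induction m with
  | nil => intro d _ _ _; simp
  | cons s m ih =>
    intro d hnd hm hmem
    simp only [List.map_cons, List.nodup_cons] at hm
    by_cases hc : d.contains s.1 = true
    · have hitems : (d.insert s.1 s.2).items = d.items :=
        insert_mem_items d hnd (hmem s (by simp) hc)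
      have hkeys : (d.insert s.1 s.2).keys = d.keys := by
        simp [PySem.Dict.keys, hitems]
      have hcont : ∀ t : String × String, (d.insert s.1 s.2).contains t.1 = d.contains t.1 := by
        intro t
        rw [PySem.Dict.contains_insert]
        by_cases h : t.1 = s.1
        · simp [h, hc]
        · simp [h]
      rw [List.foldl_cons, ih (d.insert s.1 s.2) (by rw [hkeys]; exact hnd)
            hm.2 (by intro t ht hct; rw [hitems]; exact hmem t (by simp [ht]) (by rwa [hcont t] at hct))]
      rw [hitems, List.filter_cons]
      simp only [hc, Bool.not_true, if_neg (by simp : ¬ (false = true))]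
      apply congrArg
      apply List.filter_congr; intro t _; rw [hcont t]
    · simp only [Bool.not_eq_true] at hc
      have hitems : (d.insert s.1 s.2).items = d.items ++ [(s.1, s.2)] :=
        PySem.Dict.items_insert_of_not_contains d s.2 hc
      have hkeys : (d.insert s.1 s.2).keys.Nodup := PySem.Dict.nodup_keys_insert d s.1 s.2 hnd
      have hcont : ∀ t : String × String, t ∈ m →
          (d.insert s.1 s.2).contains t.1 = d.contains t.1 := by
        intro t htm
        rw [PySem.Dict.contains_insert]
        have : t.1 ≠ s.1 := fun h => hm.1 (List.mem_map.2 ⟨t, htm, h⟩)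
        simp [this]
      rw [List.foldl_cons, ih (d.insert s.1 s.2) hkeys hm.2 ?side]
      case side =>
        intro t ht hct
        rw [hcont t ht] at hct
        rw [hitems]
        exact List.mem_append_left _ (hmem t (by simp [ht]) hct)
      rw [hitems, List.filter_cons]
      simp only [hc, Bool.not_false, if_pos rfl]
      rw [List.append_assoc, List.singleton_append]
      apply congrArg
      apply congrArg
      apply List.filter_congr; intro t ht; rw [hcont t ht]

-- the successive group passes append exactly the fibs chunks
theorem groupsA (l : List (String × String)) (hl : (l.map Prod.fst).Nodup) :
    ∀ (gs : List (List String)) (d : PySem.Dict String String)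
      (cov : (String × String) → Bool),
      d.keys.Nodup →
      (∀ s ∈ l, d.contains s.1 = cov s) →
      (∀ s ∈ l, d.contains s.1 = true → (s.1, s.2) ∈ d.items) →
      (gs.foldl (fun d g =>
          l.foldl (fun d' s => if mtch g s then d'.insert s.1 s.2 else d') d) d).items
        = d.items ++ fibs l gs cov := by
  intro gs
  induction gs with
  | nil => intro d cov _ _ _; simp [fibs]
  | cons g gs ih =>
    intro d cov hnd hcov hmem
    simp only [List.foldl_cons]
    have hmnd : ((l.filter (mtch g)).map Prod.fst).Nodup :=
      ((l.filter_sublist (p := mtch g)).map Prod.fst).nodup hl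
    have hFsub : ∀ t ∈ l.filter (fun s => mtch g s && !cov s), t ∈ l :=
      fun t ht => List.mem_of_mem_filter ht
    have hstep : (l.foldl (fun d' s => if mtch g s then d'.insert s.1 s.2 else d') d).items
        = d.items ++ l.filter (fun s => mtch g s && !cov s) := by
      rw [foldl_if_filter (mtch g) (fun d' s => d'.insert s.1 s.2) l d,
        passA (l.filter (mtch g)) d hnd hmnd
          (fun s hs hc => hmem s (List.mem_of_mem_filter hs) hc)]
      apply congrArg
      rw [List.filter_filter]
      apply List.filter_congr
      intro s hs
      rw [hcov s hs, Bool.and_comm]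
    set d1 := l.foldl (fun d' s => if mtch g s then d'.insert s.1 s.2 else d') d with hd1
    have hkeys1 : d1.keys
        = d.keys ++ (l.filter (fun s => mtch g s && !cov s)).map Prod.fst := by
      simp [PySem.Dict.keys, hstep]
    have hnd1 : d1.keys.Nodup := by
      rw [hkeys1, List.nodup_append]
      refine ⟨hnd, (((l.filter_sublist (p := fun s => mtch g s && !cov s)).map Prod.fst).nodup hl), ?_⟩
      intro a ha b hb hab
      subst hab
      rcases List.mem_map.1 hb with ⟨t, htf, hteq⟩
      have hcovt := List.of_mem_filter htf
      simp only [Bool.and_eq_true, Bool.not_eq_true'] at hcovt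
      have hct : d.contains t.1 = false := by rw [hcov t (hFsub t htf)]; exact hcovt.2
      have : d.contains t.1 = true :=
        (PySem.Dict.contains_iff_mem_keys d t.1).2 (by rw [hteq]; exact ha)
      simp [hct] at this
    have hcont1 : ∀ s ∈ l, d1.contains s.1 = (cov s || mtch g s) := by
      intro s hs
      have hiff : d1.contains s.1 = true ↔ (cov s || mtch g s) = true := by
        rw [PySem.Dict.contains_iff_mem_keys, hkeys1, List.mem_append]
        have h1 : s.1 ∈ d.keys ↔ cov s = true := by
          rw [← PySem.Dict.contains_iff_mem_keys, hcov s hs]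
        have h2 : s.1 ∈ (l.filter (fun s => mtch g s && !cov s)).map Prod.fst
            ↔ s ∈ l.filter (fun s => mtch g s && !cov s) :=
          mem_keys_iff hl hFsub hs
        rw [h1, h2, List.mem_filter]
        cases hcovs : cov s <;> cases hms : mtch g s <;> simp [hs, hcovs, hms]
      cases hct : d1.contains s.1 <;> cases h2 : (cov s || mtch g s) <;>
        first
        | rfl
        | (exfalso; rw [hct, h2] at hiff; simp at hiff)
    have hmem1 : ∀ s ∈ l, d1.contains s.1 = true → (s.1, s.2) ∈ d1.items := by
      intro s hs hc
      rw [hcont1 s hs] at hc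
      rw [hstep]
      rcases Bool.or_eq_true_iff.1 hc with hcv | hm
      · exact List.mem_append_left _ (hmem s hs (by rw [hcov s hs]; exact hcv))
      · by_cases hcv : cov s = true
        · exact List.mem_append_left _ (hmem s hs (by rw [hcov s hs]; exact hcv))
        · refine List.mem_append_right _ ?_
          have : (s.1, s.2) = s := rfl
          rw [this]
          exact List.mem_filter.2 ⟨hs, by simp [hm]; exact Bool.not_eq_true _ ▸ (by simpa using hcv)⟩
    rw [ih d1 (fun s => cov s || mtch g s) hnd1 hcont1 hmem1, hstep, List.append_assoc]
    rfl

-- ===== shared canonical description =====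

def activeOf (hint : String) : List (List String) :=
  (patternTable.map Prod.snd).filter (fun ps => ps.any (fun p => PySem.Str.isIn p hint))

-- the common value of both ports' relevant-dict items
def canon (l : List (String × String)) (hint : String) : List (String × String) :=
  l.filter (direct hint) ++ fibs l (activeOf hint) (direct hint)

-- fibs described by first-match indices instead of evolving coverage
theorem fibs_eq (l : List (String × String)) :
    ∀ (gs : List (List String)) (cov : (String × String) → Bool),
      fibs l gs cov
        = ((List.range gs.length).map
            (fun i => l.filter
              (fun s => !cov s && (gs.findIdx? (fun g => mtch g s) == some i)))).flatten := by
  intro gs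
  induction gs with
  | nil => intro cov; simp [fibs]
  | cons g gs ih =>
    intro cov
    show l.filter (fun s => mtch g s && !cov s) ++ fibs l gs (fun s => cov s || mtch g s) = _
    simp only [List.length_cons]
    rw [List.range_succ_eq_map, List.map_cons, List.flatten_cons, List.map_map, ih]
    congr 1
    · apply List.filter_congr
      intro s _
      rw [List.findIdx?_cons]
      cases hm : mtch g s <;> cases hc : cov s <;> simp [hm, hc] <;>
        cases gs.findIdx? (fun g => mtch g s) <;> simp
    · apply congrArg
      apply List.map_congr_left
      intro i _
      apply List.filter_congr
      intro s _
      rw [List.findIdx?_cons]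
      cases hm : mtch g s <;> cases hc : cov s <;> simp [hm, hc] <;>
        cases hfi : gs.findIdx? (fun g => mtch g s) <;> simp

theorem fibs_mem (l : List (String × String)) :
    ∀ (gs : List (List String)) (cov : (String × String) → Bool) (s : String × String),
      s ∈ fibs l gs cov → s ∈ l ∧ cov s = false := by
  intro gs
  induction gs with
  | nil => intro cov s h; simp [fibs] at h
  | cons g gs ih =>
    intro cov s h
    rcases List.mem_append.1 h with h | h
    · have := List.of_mem_filter h
      simp only [Bool.and_eq_true, Bool.not_eq_true'] at this
      exact ⟨List.mem_of_mem_filter h, this.2⟩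
    · have := ih (fun s => cov s || mtch g s) s h
      simp only [Bool.or_eq_false_iff] at this
      exact ⟨this.1, this.2.1⟩

theorem fibs_nodup (l : List (String × String)) (hl : (l.map Prod.fst).Nodup) :
    ∀ (gs : List (List String)) (cov : (String × String) → Bool),
      ((fibs l gs cov).map Prod.fst).Nodup := by
  intro gs
  induction gs with
  | nil => intro cov; simp [fibs]
  | cons g gs ih =>
    intro cov
    show ((l.filter (fun s => mtch g s && !cov s)
        ++ fibs l gs (fun s => cov s || mtch g s)).map Prod.fst).Nodup
    rw [List.map_append, List.nodup_append]
    refine ⟨((l.filter_sublist (p := fun s => mtch g s && !cov s)).map Prod.fst).nodup hl,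
      ih _, ?_⟩
    intro a ha b hb hab
    subst hab
    rcases List.mem_map.1 ha with ⟨t, htf, hteq⟩
    rcases List.mem_map.1 hb with ⟨u, huf, hueq⟩
    have ht := List.of_mem_filter htf
    simp only [Bool.and_eq_true, Bool.not_eq_true'] at ht
    have hu := fibs_mem l gs (fun s => cov s || mtch g s) u huf
    simp only [Bool.or_eq_false_iff] at hu
    have : t = u :=
      List.inj_on_of_nodup_map hl (List.mem_of_mem_filter htf) hu.1 (by rw [hteq, hueq])
    rw [this] at ht
    rw [ht.1] at hu
    exact absurd hu.2.2 (by simp)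

theorem canon_nodup (l : List (String × String)) (hint : String)
    (hl : (l.map Prod.fst).Nodup) : ((canon l hint).map Prod.fst).Nodup := by
  unfold canon
  rw [List.map_append, List.nodup_append]
  refine ⟨((l.filter_sublist (p := direct hint)).map Prod.fst).nodup hl,
    fibs_nodup l hl _ _, ?_⟩
  intro a ha b hb hab
  subst hab
  rcases List.mem_map.1 ha with ⟨t, htf, hteq⟩
  rcases List.mem_map.1 hb with ⟨u, huf, hueq⟩
  have ht := List.of_mem_filter htf
  have hu := fibs_mem l (activeOf hint) (direct hint) u huf
  have : t = u :=
    List.inj_on_of_nodup_map hl (List.mem_of_mem_filter htf) hu.1 (by rw [hteq, hueq])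
  rw [this] at ht
  rw [ht] at hu
  exact absurd hu.2 (by simp)

-- canon as the flatten of the rank fibres, in rank order
theorem canon_flat (l : List (String × String)) (hint : String) :
    ((List.range ((activeOf hint).length + 1)).map
        (fun r => l.filter (fun s => rk hint (activeOf hint) s == some r))).flatten
      = canon l hint := by
  rw [List.range_succ_eq_map, List.map_cons, List.flatten_cons, List.map_map]
  unfold canon
  congr 1
  · apply List.filter_congr
    intro s _
    cases hd : direct hint s
    · cases hfi : (activeOf hint).findIdx? (fun g => mtch g s) <;> simp [rk, hd, hfi]
    · simp [rk, hd]
  · rw [fibs_eq]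
    apply congrArg
    apply List.map_congr_left
    intro i _
    apply List.filter_congr
    intro s _
    cases hd : direct hint s
    · cases hfi : (activeOf hint).findIdx? (fun g => mtch g s) <;> simp [rk, hd, hfi]
    · simp [rk, hd]

-- a fold of inserts over pairwise-fresh pairs appends them
theorem items_foldl_insert_pairs (L : List (String × String)) (d : PySem.Dict String String)
    (h1 : ∀ p ∈ L, d.contains p.1 = false) (h2 : (L.map Prod.fst).Nodup) :
    (L.foldl (fun acc p => acc.insert p.1 p.2) d).items = d.items ++ L := by
  have h := PySem.Dict.items_foldl_insert_fresh L Prod.fst Prod.snd d h1 h2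
  simpa using h

theorem items_ofList_nodup (L : List (String × String)) (h : (L.map Prod.fst).Nodup) :
    (PySem.Dict.ofList L).items = L := by
  show (PySem.Dict.empty.update L).items = L
  simp only [PySem.Dict.update]
  rw [items_foldl_insert_pairs L PySem.Dict.empty (fun p _ => PySem.Dict.contains_empty p.1) h]
  rfl

-- port A computes the canonical list (or falls back to its argument)
theorem A_items (l : List (String × String)) (hint : String)
    (hl : (l.map Prod.fst).Nodup) :
    find_relevant_sections_py l hint
      = if (canon l hint).isEmpty then l else canon l hint := by
  simp only [find_relevant_sections_py]
  rw [foldl_if_filter (fun s => PySem.Str.isIn hint (PySem.Str.lower s.1))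
        (fun (d : PySem.Dict String String) s => d.insert s.1 s.2) l PySem.Dict.empty]
  set d0 := (l.filter (fun s => PySem.Str.isIn hint (PySem.Str.lower s.1))).foldl
      (fun (d : PySem.Dict String String) s => d.insert s.1 s.2) PySem.Dict.empty with hd0
  have hfd : l.filter (fun s => PySem.Str.isIn hint (PySem.Str.lower s.1))
      = l.filter (direct hint) := rfl
  have hd0items : d0.items = l.filter (direct hint) := by
    rw [hd0, hfd,
      items_foldl_insert_pairs _ PySem.Dict.empty
        (fun p _ => PySem.Dict.contains_empty p.1)
        (((l.filter_sublist (p := direct hint)).map Prod.fst).nodup hl)]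
    rfl
  have hd0nd : d0.keys.Nodup := by
    simp only [PySem.Dict.keys, hd0items]
    exact ((l.filter_sublist (p := direct hint)).map Prod.fst).nodup hl
  have hd0cov : ∀ s ∈ l, d0.contains s.1 = direct hint s := by
    intro s hs
    have hiff : d0.contains s.1 = true ↔ direct hint s = true := by
      rw [PySem.Dict.contains_iff_mem_keys]
      simp only [PySem.Dict.keys, hd0items]
      rw [mem_keys_iff hl (fun t ht => List.mem_of_mem_filter ht) hs, List.mem_filter]
      simp [hs]
    cases hct : d0.contains s.1 <;> cases h2 : direct hint s <;>
      first
      | rfl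
      | (exfalso; rw [hct, h2] at hiff; simp at hiff)
  have hd0mem : ∀ s ∈ l, d0.contains s.1 = true → (s.1, s.2) ∈ d0.items := by
    intro s hs hc
    rw [hd0cov s hs] at hc
    rw [hd0items]
    have : (s.1, s.2) = s := rfl
    rw [this]
    exact List.mem_filter.2 ⟨hs, hc⟩
  rw [foldl_if_filter (fun g : String × List String => g.2.any (fun p => PySem.Str.isIn p hint))
        (fun (d : PySem.Dict String String) g =>
          l.foldl (fun d' s =>
            if g.2.any (fun p => PySem.Str.isIn p (PySem.Str.lower s.1))
            then d'.insert s.1 s.2 else d')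
        d)
        patternTable d0]
  have hmapfold :
      (patternTable.filter
          (fun g => g.2.any (fun p => PySem.Str.isIn p hint))).foldl
        (fun (d : PySem.Dict String String) g =>
          l.foldl (fun d' s =>
            if g.2.any (fun p => PySem.Str.isIn p (PySem.Str.lower s.1))
            then d'.insert s.1 s.2 else d') d) d0
      = (activeOf hint).foldl
          (fun (d : PySem.Dict String String) g =>
            l.foldl (fun d' s => if mtch g s then d'.insert s.1 s.2 else d') d) d0 := by
    unfold activeOf
    rw [List.filter_map, List.foldl_map]
    rfl
  rw [hmapfold]
  have hG := groupsA l hl (activeOf hint) d0 (direct hint) hd0nd hd0cov hd0mem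
  rw [hG, hd0items]
  rfl

-- ===== B-side lemmas: stable sort by a bounded Nat key = concatenation of key fibres =====

-- inserting x into (A ++ B) where A's keys are ≤ key x and B's keys are > key x
theorem insertBy_split {α : Type} (key : α → Nat) (x : α) :
    ∀ (A B : List α), (∀ a ∈ A, ¬ key x < key a) → (∀ b ∈ B, key x < key b) →
      PySem.List.insertBy (fun a b => decide (key a < key b)) x (A ++ B) = A ++ x :: B := by
  intro A
  induction A with
  | nil =>
    intro B _ hB
    cases B with
    | nil => simp [PySem.List.insertBy]
    | cons b bs => simp [PySem.List.insertBy, hB b (by simp)]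
  | cons a A ih =>
    intro B hA hB
    have hna : ¬ key x < key a := hA a (by simp)
    simp only [List.cons_append, PySem.List.insertBy, decide_eq_true_eq, if_neg hna]
    rw [ih B (fun a' ha' => hA a' (by simp [ha'])) hB]

-- the insertion-sort fold lays each element at the end of its key fibre
theorem foldl_insertBy_fibers {α : Type} (key : α → Nat) (Bnd : Nat) :
    ∀ l : List α, (∀ s ∈ l, key s < Bnd) →
      l.foldl (fun acc x => PySem.List.insertBy (fun a b => decide (key a < key b)) x acc) []
        = ((List.range Bnd).map (fun r => l.filter (fun s => key s == r))).flatten := by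
  intro l
  induction l using List.reverseRecOn with
  | nil => intro _; simp
  | append_singleton l x ih =>
    intro hlt
    have hkx : key x < Bnd := hlt x (by simp)
    rw [List.foldl_append, List.foldl_cons, List.foldl_nil,
      ih (fun s hs => hlt s (by simp [hs]))]
    have hBnd : Bnd = (key x + 1) + (Bnd - (key x + 1)) := by omega
    rw [hBnd, List.range_add, List.range_succ]
    set R2 := (List.range (Bnd - (key x + 1))).map (fun i => key x + 1 + i) with hR2
    have hmemR2 : ∀ r ∈ R2, key x < r := by
      intro r hr
      rcases List.mem_map.1 hr with ⟨i, _, hi⟩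
      omega
    set fib := fun (m : List α) (r : Nat) => m.filter (fun s => key s == r) with hfib
    -- split the old flatten at the key-x fibre
    rw [List.map_append, List.map_append, List.flatten_append, List.flatten_append]
    set A0 := ((List.range (key x)).map (fib l)).flatten with hA0
    have hsplit : ((List.range (key x)).map (fib l)).flatten
          ++ ([key x].map (fib l)).flatten ++ (R2.map (fib l)).flatten
        = (A0 ++ fib l (key x)) ++ (R2.map (fib l)).flatten := by
      simp [hA0, List.append_assoc]
    rw [hsplit, insertBy_split key x (A0 ++ fib l (key x)) ((R2.map (fib l)).flatten) ?hle ?hgt]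
    case hle =>
      intro a ha
      rcases List.mem_append.1 ha with ha | ha
      · rcases List.mem_flatten.1 ha with ⟨m, hm, ham⟩
        rcases List.mem_map.1 hm with ⟨r, hr, hmr⟩
        rw [← hmr] at ham
        have := List.of_mem_filter (p := fun s => key s == r) (by simpa [hfib] using ham)
        have hrlt := List.mem_range.1 hr
        simp only [beq_iff_eq] at this
        omega
      · have := List.of_mem_filter ha
        simp only [beq_iff_eq] at this
        omega
    case hgt =>
      intro b hb
      rcases List.mem_flatten.1 hb with ⟨m, hm, hmr2⟩
      rcases List.mem_map.1 hm with ⟨r, hr, hmr⟩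
      rw [← hmr] at hmr2
      have := List.of_mem_filter (p := fun s => key s == r) (by simpa [hfib] using hmr2)
      simp only [beq_iff_eq] at this
      have := hmemR2 r hr
      omega
    -- now compare fibre by fibre with the new list l ++ [x]
    have hfib_new : ∀ r, fib (l ++ [x]) r = fib l r ++ (if key x == r then [x] else []) := by
      intro r
      simp only [hfib, List.filter_append]
      congr 1
      by_cases h : key x = r <;> simp [h]
    have h1 : (List.range (key x)).map (fib (l ++ [x])) = (List.range (key x)).map (fib l) := by
      apply List.map_congr_left
      intro r hr
      have := List.mem_range.1 hr
      rw [hfib_new r, if_neg (by simp; omega)]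
      simp
    have h2 : fib (l ++ [x]) (key x) = fib l (key x) ++ [x] := by
      rw [hfib_new (key x), if_pos (by simp)]
    have h3 : R2.map (fib (l ++ [x])) = R2.map (fib l) := by
      apply List.map_congr_left
      intro r hr
      have := hmemR2 r hr
      rw [hfib_new r, if_neg (by simp; omega)]
      simp
    calc A0 ++ fib l (key x) ++ x :: (R2.map (fib l)).flatten
        = ((List.range (key x)).map (fib (l ++ [x]))).flatten ++ fib (l ++ [x]) (key x)
            ++ (R2.map (fib (l ++ [x]))).flatten := by
          rw [h1, h2, h3, hA0]; simp [List.append_assoc]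
      _ = ((List.range (key x) ++ [key x] ++ R2).map (fib (l ++ [x]))).flatten := by
          rw [List.map_append, List.map_append, List.flatten_append, List.flatten_append]; simp
      _ = ((List.range (key x) ++ [key x] ++ R2).map
            (fun r => (l ++ [x]).filter (fun s => key s == r))).flatten := by
          rw [hfib]

-- Python's stable sort by a bounded Nat key, described as the fibres in key order
theorem sorted_fibers {α : Type} (key : α → Nat) (Bnd : Nat) (l : List α)
    (h : ∀ s ∈ l, key s < Bnd) :
    PySem.List.sorted l key false
      = ((List.range Bnd).map (fun r => l.filter (fun s => key s == r))).flatten := by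
  rw [PySem.List.sorted_eq_foldl_insertBy]
  exact foldl_insertBy_fibers key Bnd l h

-- port B computes the same canonical list (or the same fallback)
theorem B_items (l : List (String × String)) (hint : String)
    (hl : (l.map Prod.fst).Nodup) :
    find_relevant_sections_py_alt l hint
      = if (canon l hint).isEmpty then l else canon l hint := by
  have h1 : find_relevant_sections_py_alt l hint
      = (if (PySem.Dict.ofList (PySem.List.sorted
            (l.filter (fun s => (rk hint (activeOf hint) s).isSome))
            (fun item => (rk hint (activeOf hint) item).getD 0) false)).items.isEmpty
         then l
         else (PySem.Dict.ofList (PySem.List.sorted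
            (l.filter (fun s => (rk hint (activeOf hint) s).isSome))
            (fun item => (rk hint (activeOf hint) item).getD 0) false)).items) := rfl
  rw [h1]
  have hbd : ∀ s ∈ l.filter (fun s => (rk hint (activeOf hint) s).isSome),
      (rk hint (activeOf hint) s).getD 0 < (activeOf hint).length + 1 := by
    intro s hs
    have hsome := List.of_mem_filter hs
    cases h : rk hint (activeOf hint) s with
    | none => rw [h] at hsome; simp at hsome
    | some r =>
      simp only [h, Option.getD_some]
      unfold rk at h
      by_cases hd : direct hint s = true
      · rw [if_pos hd] at h
        simp at h
        omega
      · rw [if_neg hd] at h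
        rcases Option.map_eq_some_iff.1 h with ⟨i, hfi, hir⟩
        have : i < (activeOf hint).length := by
          have := List.findIdx?_eq_some_iff_findIdx_eq.1 hfi
          exact this.1
        omega
  rw [sorted_fibers (fun item => (rk hint (activeOf hint) item).getD 0)
        ((activeOf hint).length + 1) _ hbd]
  have hfibeq : ∀ r : Nat,
      (l.filter (fun s => (rk hint (activeOf hint) s).isSome)).filter
          (fun s => (rk hint (activeOf hint) s).getD 0 == r)
        = l.filter (fun s => rk hint (activeOf hint) s == some r) := by
    intro r
    rw [List.filter_filter]
    apply List.filter_congr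
    intro s _
    cases h : rk hint (activeOf hint) s with
    | none => simp [h]
    | some k => simp [h]
  have hmapeq : (List.range ((activeOf hint).length + 1)).map
        (fun r => (l.filter (fun s => (rk hint (activeOf hint) s).isSome)).filter
          (fun s => (rk hint (activeOf hint) s).getD 0 == r))
      = (List.range ((activeOf hint).length + 1)).map
        (fun r => l.filter (fun s => rk hint (activeOf hint) s == some r)) :=
    List.map_congr_left (fun r _ => hfibeq r)
  rw [hmapeq, canon_flat, items_ofList_nodup _ (canon_nodup l hint hl)]

theorem find_relevant_sections_py_spec : Claim_equal_find_relevant_sections_py := by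
  intro sections section_hint _ hpre
  unfold Spec_find_relevant_sections_py
  rw [A_items sections section_hint hpre, B_items sections section_hint hpre]
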